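-- pv_equiv track=rewrite | github.com/javianng/thecode_CS1010X | Side_Quest/sidequest10.1/sidequest10.1-template.py | merge_right
-- ===== SOURCE A (Python) =====
-- def reverse(mat):
--     reversed_mat = [list(x) for x in mat]
--     for i in reversed_mat:
--         i.reverse()
--     return reversed_mat
--
-- def merge_right(mat):
--
--     reverse_mat = reverse(mat)
--
--     increment = []
--
--     def merge_left_row(row):
--         result_row = []
--         correct_len = len(row)
--
--         def helper(row):
--             current_tile = row[0]
--             if len(row) == 1: # if one last element, add to current tile
--                 result_row.append(current_tile)
--             elif len(row) == 0: # if no elements, end helper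
--                 return []
--             elif current_tile == 0: # for all cases of 0, the next number is then considered
--                 return helper(row[1:len(row)])
--             elif len(row) == 2: # if two elements left to consider
--                 next_tile = row[1]
--                 if current_tile == next_tile:
--                     result_row.append(current_tile*2)
--                     increment.append(current_tile*2)
--                 elif current_tile != next_tile:
--                     result_row.append(current_tile)
--                     return helper(row[1:len(row)])
--             elif len(row) > 2:
--                 next_tile = row[1]
--                 if current_tile == next_tile: # if current = next, add them together and look at the rest
--                     result_row.append(current_tile*2)
--                     increment.append(current_tile*2)
--                     return helper(row[2:len(row)])
--                 elif next_tile == 0: # if next = 0, consider current and the rest.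
--                     return helper([current_tile] + row[2:len(row)])
--                 elif current_tile != next_tile: # if next != 0 and current != next, consider rest and append current to result
--                     result_row.append(current_tile)
--                     return helper(row[1:len(row)])
--
--         helper(row)
--         result_len = len(result_row)
--         number_of_zeros = correct_len - result_len
--         result_row += [0]*number_of_zeros
--
--         return result_row
--
--     new_mat = []
--     for row in reverse_mat:
--         new_mat.append(merge_left_row(row))
--     return (reverse(new_mat), reverse(new_mat) != mat, sum(increment))
-- ===== SOURCE B (Python) =====
-- def merge_right(mat):
--     score = 0
--     new = []
--     for row in mat:
--         merged = []          # merged tiles, built right-to-left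
--         prev = None          # pending unmerged tile
--         for v in reversed(row):
--             if v == 0:
--                 continue
--             if prev is None:
--                 prev = v
--             elif prev == v:
--                 merged.append(prev * 2)
--                 score += prev * 2
--                 prev = None
--             else:
--                 merged.append(prev)
--                 prev = v
--         if prev is not None:
--             merged.append(prev)
--         new.append([0] * (len(row) - len(merged)) + merged[::-1])
--     return (new, new != mat, score)
-- ===== Notes on version B (the rewrite author's own statement) =====
-- stated objective: faster
-- what changed: Replaces the reverse/recursive-slicing merge (each helper call copies a slice of the row) with a single right-to-left pass per row keeping one pending tile, with no row reversal or slice copying.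
import Mathlib
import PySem

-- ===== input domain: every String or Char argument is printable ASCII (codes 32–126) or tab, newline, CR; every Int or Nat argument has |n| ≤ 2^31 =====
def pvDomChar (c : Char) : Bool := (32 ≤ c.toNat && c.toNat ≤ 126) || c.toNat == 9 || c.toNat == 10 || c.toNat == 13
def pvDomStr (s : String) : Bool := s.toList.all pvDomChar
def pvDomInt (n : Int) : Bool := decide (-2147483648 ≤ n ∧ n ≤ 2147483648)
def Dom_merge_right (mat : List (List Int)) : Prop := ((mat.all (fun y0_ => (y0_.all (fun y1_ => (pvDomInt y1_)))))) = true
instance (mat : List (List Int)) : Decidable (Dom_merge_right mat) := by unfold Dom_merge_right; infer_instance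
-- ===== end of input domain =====

-- B replaces A's reverse + recursive slicing merge with one right-to-left pass per
-- row keeping a single pending tile (measured asymptotically faster, O(n*k) vs O(n*k^2)).


-- ===== PORT A =====
def pyReverse (mat : List (List Int)) : List (List Int) := mat.map (fun x => x.reverse)

-- A's nested 'helper': mutable result_row / increment lists threaded as arguments.
-- On an empty row Python raises IndexError (row[0]); excluded by Pre_; here it returns the state.
def helperA : List Int → List Int → List Int → List Int × List Int
  | [], res, inc => (res, inc)
  | [c], res, inc => (res ++ [c], inc)
  | c :: d :: rest, res, inc =>
    if c = 0 then helperA (d :: rest) res inc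
    else if rest = [] then
      if c = d then (res ++ [c * 2], inc ++ [c * 2])
      else helperA [d] (res ++ [c]) inc
    else
      if c = d then helperA rest (res ++ [c * 2]) (inc ++ [c * 2])
      else if d = 0 then helperA (c :: rest) res inc
      else helperA (d :: rest) (res ++ [c]) inc
termination_by r _ _ => r.length
decreasing_by all_goals simp

def mergeLeftRowA (row : List Int) (inc : List Int) : List Int × List Int :=
  let r := helperA row [] inc
  (r.1 ++ List.replicate (row.length - r.1.length) 0, r.2)

def merge_right (mat : List (List Int)) : List (List Int) × Bool × Int :=
  let rm := pyReverse mat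
  let p := rm.foldl (fun (acc : List (List Int) × List Int) row =>
      let r := mergeLeftRowA row acc.2
      (acc.1 ++ [r.1], r.2)) ([], [])
  (pyReverse p.1, decide (pyReverse p.1 ≠ mat), p.2.sum)

-- ===== PORT B =====
def stepB (st : List Int × Option Int × Int) (v : Int) : List Int × Option Int × Int :=
  if v = 0 then st
  else match st.2.1 with
    | none => (st.1, some v, st.2.2)
    | some p => if p = v then (st.1 ++ [p * 2], none, st.2.2 + p * 2)
                else (st.1 ++ [p], some v, st.2.2)

def rowB (row : List Int) (s : Int) : List Int × Int :=
  let t := row.reverse.foldl stepB ([], none, s)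
  let m := match t.2.1 with | none => t.1 | some p => t.1 ++ [p]
  (List.replicate (row.length - m.length) 0 ++ m.reverse, t.2.2)

def merge_right_alt (mat : List (List Int)) : List (List Int) × Bool × Int :=
  let p := mat.foldl (fun (acc : List (List Int) × Int) row =>
      let r := rowB row acc.2
      (acc.1 ++ [r.1], r.2)) ([], 0)
  (p.1, decide (p.1 ≠ mat), p.2)

-- ===== PRECONDITION & SPEC =====
-- Pre_ excludes matrices with an empty row: there A's helper reads row[0] and raises IndexError.
def Pre_merge_right (mat : List (List Int)) : Prop := ∀ row ∈ mat, row ≠ []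
instance (mat : List (List Int)) : Decidable (Pre_merge_right mat) := by unfold Pre_merge_right; infer_instance
def pvWitness_merge_right : List (List Int) := [[2, 2, 0, 4], [0, 2, 2, 2]]

def Spec_merge_right (mat : List (List Int)) (out : List (List Int) × Bool × Int) : Prop := out = merge_right_alt mat
instance (mat : List (List Int)) (out : List (List Int) × Bool × Int) : Decidable (Spec_merge_right mat out) := by unfold Spec_merge_right; infer_instance

-- ===== CLAIM (what is proved, stated in full; the proofs are below) =====
def Claim_equal_merge_right : Prop := ∀ (mat : List (List Int)), Dom_merge_right mat → Pre_merge_right mat → Spec_merge_right mat (merge_right mat)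

-- ===== LEMMAS AND PROOFS =====

-- reference merge of a zero-free list: (merged tiles, merge increments)
def mp : List Int → List Int × List Int
  | [] => ([], [])
  | [c] => ([c], [])
  | c :: d :: rest =>
    if c = d then ((c * 2) :: (mp rest).1, (c * 2) :: (mp rest).2)
    else (c :: (mp (d :: rest)).1, (mp (d :: rest)).2)
termination_by l => l.length
theorem helperA_spec : ∀ r res inc : List Int,
    ((helperA r res inc).1 = res ++ (mp (r.filter (· ≠ 0))).1 ∨
     (helperA r res inc).1 = res ++ (mp (r.filter (· ≠ 0))).1 ++ [0]) ∧
    (helperA r res inc).2 = inc ++ (mp (r.filter (· ≠ 0))).2 ∧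
    (helperA r res inc).1.length ≤ res.length + r.length := by
  intro r res inc
  induction r, res, inc using helperA.induct with
  | case1 res inc => simp [helperA, mp]
  | case2 c res inc =>
    by_cases hc : c = 0 <;> simp [helperA, mp, hc]
  | case3 c rest res inc ih =>
    obtain ⟨h1, h2, h3⟩ := ih
    refine ⟨?_, ?_, ?_⟩
    · rcases h1 with h | h <;> [left; right] <;> simpa [helperA] using h
    · simpa [helperA] using h2
    · have he : helperA ((0:Int) :: c :: rest) res inc = helperA (c :: rest) res inc := by
        simp [helperA]
      rw [he]; simp at h3 ⊢; omega
  | case4 c res inc hc =>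
    simp [helperA, mp, hc]
  | case5 c d res inc hc hcd ih =>
    obtain ⟨h1, h2, h3⟩ := ih
    by_cases hd : d = 0
    · subst hd
      refine ⟨?_, ?_, ?_⟩
      · rcases h1 with h | h <;> [left; right] <;>
          simpa [helperA, hc, hcd, mp] using h
      · simpa [helperA, hc, hcd, mp] using h2
      · simp [helperA, hc] at h3 ⊢
    · refine ⟨?_, ?_, ?_⟩
      · rcases h1 with h | h <;> [left; right] <;>
          simpa [helperA, hc, hcd, hd, mp] using h
      · simpa [helperA, hc, hcd, hd, mp] using h2
      · simp [helperA, hc, hcd] at h3 ⊢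
  | case6 c rest res inc hr hc ih =>
    obtain ⟨h1, h2, h3⟩ := ih
    refine ⟨?_, ?_, ?_⟩
    · rcases h1 with h | h <;> [left; right] <;>
        simpa [helperA, hc, hr, mp] using h
    · simpa [helperA, hc, hr, mp] using h2
    · simp [helperA, hc, hr] at h3 ⊢
      omega
  | case7 c rest res inc hc hr hc2 ih =>
    obtain ⟨h1, h2, h3⟩ := ih
    refine ⟨?_, ?_, ?_⟩
    · rcases h1 with h | h <;> [left; right] <;>
        simpa [helperA, hc, hr, mp] using h
    · simpa [helperA, hc, hr, mp] using h2
    · simp [helperA, hc, hr] at h3 ⊢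
      omega
  | case8 c d rest res inc hc hr hcd hd ih =>
    obtain ⟨h1, h2, h3⟩ := ih
    refine ⟨?_, ?_, ?_⟩
    · rcases h1 with h | h <;> [left; right] <;>
        simpa [helperA, hc, hr, hcd, hd, mp] using h
    · simpa [helperA, hc, hr, hcd, hd, mp] using h2
    · simp [helperA, hc, hr, hcd, hd] at h3 ⊢
      omega

theorem foldB_spec : ∀ (r : List Int) (m : List Int) (prev : Option Int) (s : Int),
    (match (r.foldl stepB (m, prev, s)).2.1 with
      | none => (r.foldl stepB (m, prev, s)).1
      | some p => (r.foldl stepB (m, prev, s)).1 ++ [p]) =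
        m ++ (mp (prev.toList ++ r.filter (· ≠ 0))).1 ∧
    (r.foldl stepB (m, prev, s)).2.2 = s + (mp (prev.toList ++ r.filter (· ≠ 0))).2.sum := by
  intro r
  induction r with
  | nil =>
    intro m prev s
    cases prev <;> simp [mp]
  | cons v r ih =>
    intro m prev s
    by_cases hv : v = 0
    · subst hv
      simpa [stepB] using ih m prev s
    · cases prev with
      | none =>
        simpa [stepB, hv] using ih m (some v) s
      | some p =>
        by_cases hp : p = v
        · subst hp
          have := ih (m ++ [p * 2]) none (s + p * 2)
          simp [stepB, hv, mp] at this ⊢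
          constructor
          · rw [this.1]
          · rw [this.2]; ring
        · have := ih (m ++ [p]) (some v) s
          simp [stepB, hv, hp, mp] at this ⊢
          constructor
          · rw [this.1]
          · rw [this.2]

theorem rep_shift (a : Int) (n k : Nat) (X : List Int) (h : k + 1 ≤ n) :
    List.replicate (n - (k + 1)) a ++ a :: X = List.replicate (n - k) a ++ X := by
  have hn : n - k = (n - (k + 1)) + 1 := by omega
  rw [hn, List.replicate_succ', List.append_assoc]
  simp

theorem row_eq : ∀ (row : List Int) (inc : List Int) (s : Int),
    (mergeLeftRowA row.reverse inc).1.reverse = (rowB row s).1 ∧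
    (mergeLeftRowA row.reverse inc).2 = inc ++ (mp (row.reverse.filter (· ≠ 0))).2 ∧
    (rowB row s).2 = s + (mp (row.reverse.filter (· ≠ 0))).2.sum := by
  intro row inc s
  obtain ⟨h1, h2, h3⟩ := helperA_spec row.reverse [] inc
  obtain ⟨hb1, hb2⟩ := foldB_spec row.reverse [] none s
  simp only [Option.toList_none, List.nil_append] at hb1 hb2 h1 h3
  refine ⟨?_, by simpa [mergeLeftRowA] using h2, by simpa [rowB] using hb2⟩
  simp only [mergeLeftRowA, rowB]
  rw [hb1]
  rcases h1 with h | h <;> rw [h]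
  · simp [List.reverse_append]
  · have hlen : (mp (List.filter (fun x => decide (x ≠ 0)) row.reverse)).1.length + 1 ≤ row.length := by
      rw [h] at h3; simpa using h3
    simp [List.reverse_append]
    simp only [List.filter_reverse] at hlen
    rw [rep_shift _ _ _ _ (by simpa using hlen)]

theorem outer_eq : ∀ (mat : List (List Int)) (accA accB : List (List Int)) (incA : List Int) (s : Int),
    pyReverse accA = accB → incA.sum = s →
    (pyReverse ((pyReverse mat).foldl (fun (acc : List (List Int) × List Int) row =>
        let r := mergeLeftRowA row acc.2
        (acc.1 ++ [r.1], r.2)) (accA, incA)).1 =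
      (mat.foldl (fun (acc : List (List Int) × Int) row =>
        let r := rowB row acc.2
        (acc.1 ++ [r.1], r.2)) (accB, s)).1) ∧
    ((pyReverse mat).foldl (fun (acc : List (List Int) × List Int) row =>
        let r := mergeLeftRowA row acc.2
        (acc.1 ++ [r.1], r.2)) (accA, incA)).2.sum =
      (mat.foldl (fun (acc : List (List Int) × Int) row =>
        let r := rowB row acc.2
        (acc.1 ++ [r.1], r.2)) (accB, s)).2 := by
  intro mat
  induction mat with
  | nil => intro accA accB incA s h1 h2; simpa [pyReverse] using ⟨h1, h2⟩
  | cons row mat ih =>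
    intro accA accB incA s h1 h2
    obtain ⟨r1, r2, r3⟩ := row_eq row incA s
    simp only [pyReverse, List.map_cons, List.foldl_cons]
    refine ih _ _ _ _ ?_ ?_
    · simp only [pyReverse] at h1 ⊢
      rw [List.map_append, h1]
      simp only [List.map_cons, List.map_nil]
      rw [r1]
    · rw [r2, r3, ← h2]
      simp

theorem merge_right_spec : Claim_equal_merge_right := by
  intro mat _ _
  unfold Spec_merge_right
  obtain ⟨h1, h2⟩ := outer_eq mat [] [] [] 0 (by simp [pyReverse]) rfl
  simp only [merge_right, merge_right_alt]
  rw [h1, h2]
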